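-- pv_equiv track=rewrite | github.com/hatzel/salsa-standoff-annotations | main.py | sentence_from_tokens
-- ===== SOURCE A (Python) =====
-- from typing import Dict, List, Set, Tuple
--
-- def sentence_from_tokens(
--     tokens: List[str], pos_list: List[str]
-- ) -> Tuple[str, List[Tuple[int, int]]]:
--     """
--     Apply some heuristics to create a sensible text text from the tokens.
--
--     Unfortunately the original whitespace information is not available.
--     """
--     assert len(tokens) == len(pos_list)
--     token_list = []
--     out = ""
--     for i, (token, pos) in enumerate(zip(tokens, pos_list)):
--         if i < len(tokens) - 1:
--             next_token = tokens[i + 1]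
--             next_pos = pos_list[i + 1]
--         else:
--             next_token = None
--             next_pos = None
--         token_list.append(tuple([len(out), len(out) + len(token)]))
--         if (
--             next_pos in ["$.", "$,"]
--             or token in ["``", "(", "/"]
--             or next_token in ["''", ")", "/"]
--             or next_token is None
--         ):
--             out += token
--         else:
--             out += token + " "
--     return out, token_list
-- ===== SOURCE B (Python) =====
-- def sentence_from_tokens(tokens, pos_list):
--     assert len(tokens) == len(pos_list)
--     # First pass: does a space follow token i?  (last token: never)
--     seps = [
--         not (np in ("$.", "$,") or t in ("``", "(", "/") or nt in ("''", ")", "/"))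
--         for t, nt, np in zip(tokens, tokens[1:], pos_list[1:])
--     ] + ([False] if tokens else [])
--     # Second pass: prefix-sum the chunk lengths into spans.
--     spans = []
--     start = 0
--     for t, s in zip(tokens, seps):
--         spans.append((start, start + len(t)))
--         start += len(t) + (1 if s else 0)
--     text = "".join(t + (" " if s else "") for t, s in zip(tokens, seps))
--     return text, spans
-- ===== Notes on version B (the rewrite author's own statement) =====
-- stated objective: alternative
-- what changed: Replaces A's single interleaved loop with len(out) bookkeeping by a separator table computed over adjacent token pairs (zip with the shifted lists), a prefix-sum pass turning chunk lengths into spans, and a join for the text.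
import Mathlib
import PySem

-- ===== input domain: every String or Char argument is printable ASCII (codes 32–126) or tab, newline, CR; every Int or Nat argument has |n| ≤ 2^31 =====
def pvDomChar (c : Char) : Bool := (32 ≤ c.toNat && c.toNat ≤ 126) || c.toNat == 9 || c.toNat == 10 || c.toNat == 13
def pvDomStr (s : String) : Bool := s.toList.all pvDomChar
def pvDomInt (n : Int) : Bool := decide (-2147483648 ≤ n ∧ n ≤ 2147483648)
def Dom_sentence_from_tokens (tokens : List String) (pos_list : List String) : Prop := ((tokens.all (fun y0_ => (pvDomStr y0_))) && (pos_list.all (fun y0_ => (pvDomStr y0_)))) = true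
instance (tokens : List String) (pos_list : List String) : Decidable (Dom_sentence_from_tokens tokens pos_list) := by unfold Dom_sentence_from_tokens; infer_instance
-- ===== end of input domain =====

-- B replaces A's interleaved `len(out)` bookkeeping by a separator table over adjacent
-- token pairs plus a prefix-sum of chunk lengths (objective: alternative decomposition).

-- ===== PORT A =====
def sentence_from_tokens (tokens : List String) (pos_list : List String) : String × (List (Int × Int)) :=
  let res := (PySem.List.enumerate (tokens.zip pos_list)).foldl
    (fun (st : List (Int × Int) × String) (ip : Int × (String × String)) =>
      let i := ip.1
      let token := ip.2.1
      let next_token : Option String :=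
        if i < PySem.List.len tokens - 1 then PySem.List.pyGet? tokens (i + 1) else none
      let next_pos : Option String :=
        if i < PySem.List.len tokens - 1 then PySem.List.pyGet? pos_list (i + 1) else none
      let token_list := st.1 ++ [(PySem.Str.len st.2, PySem.Str.len st.2 + PySem.Str.len token)]
      if next_pos == some "$." || next_pos == some "$," ||
         token == "``" || token == "(" || token == "/" ||
         next_token == some "''" || next_token == some ")" || next_token == some "/" ||
         next_token == none then
        (token_list, st.2 ++ token)
      else
        (token_list, st.2 ++ (token ++ " "))) ([], "")
  (res.2, res.1)

-- ===== PORT B =====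
def sentence_from_tokens_alt (tokens : List String) (pos_list : List String) : String × (List (Int × Int)) :=
  let seps : List Bool :=
    ((tokens.zip ((tokens.drop 1).zip (pos_list.drop 1))).map
      (fun tp => !(tp.2.2 == "$." || tp.2.2 == "$," || tp.1 == "``" || tp.1 == "(" || tp.1 == "/" ||
                   tp.2.1 == "''" || tp.2.1 == ")" || tp.2.1 == "/")))
    ++ (if tokens.isEmpty then [] else [false])
  let pairs := tokens.zip seps
  let res := pairs.foldl
    (fun (st : List (Int × Int) × Int) (p : String × Bool) =>
      (st.1 ++ [(st.2, st.2 + PySem.Str.len p.1)],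
       st.2 + PySem.Str.len p.1 + (if p.2 then 1 else 0))) ([], (0 : Int))
  (PySem.Str.join "" (pairs.map (fun p => p.1 ++ (if p.2 then " " else ""))), res.1)

-- ===== PRECONDITION & SPEC =====
-- A (and B) assert len(tokens) == len(pos_list); unequal lengths raise AssertionError.
def Pre_sentence_from_tokens (tokens : List String) (pos_list : List String) : Prop :=
  tokens.length = pos_list.length
instance (tokens : List String) (pos_list : List String) : Decidable (Pre_sentence_from_tokens tokens pos_list) := by unfold Pre_sentence_from_tokens; infer_instance
def pvWitness_sentence_from_tokens : List String × List String := (["a", "b"], ["NN", "NN"])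
def Spec_sentence_from_tokens (tokens : List String) (pos_list : List String) (out : String × (List (Int × Int))) : Prop := out = sentence_from_tokens_alt tokens pos_list
instance (tokens : List String) (pos_list : List String) (out : String × (List (Int × Int))) : Decidable (Spec_sentence_from_tokens tokens pos_list out) := by unfold Spec_sentence_from_tokens; infer_instance

-- ===== CLAIM (what is proved, stated in full; the proofs are below) =====
def Claim_equal_sentence_from_tokens : Prop := ∀ (tokens : List String) (pos_list : List String), Dom_sentence_from_tokens tokens pos_list → Pre_sentence_from_tokens tokens pos_list → Spec_sentence_from_tokens tokens pos_list (sentence_from_tokens tokens pos_list)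

-- ===== LEMMAS AND PROOFS =====

-- the common step: one (token, space?) chunk, as A performs it
def pvStep (st : List (Int × Int) × String) (p : String × Bool) : List (Int × Int) × String :=
  (st.1 ++ [(PySem.Str.len st.2, PySem.Str.len st.2 + PySem.Str.len p.1)],
   st.2 ++ (p.1 ++ (if p.2 then " " else "")))

def pvSeps (tokens pos_list : List String) : List Bool :=
  ((tokens.zip ((tokens.drop 1).zip (pos_list.drop 1))).map
    (fun tp => !(tp.2.2 == "$." || tp.2.2 == "$," || tp.1 == "``" || tp.1 == "(" || tp.1 == "/" ||
                 tp.2.1 == "''" || tp.2.1 == ")" || tp.2.1 == "/")))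
  ++ (if tokens.isEmpty then [] else [false])

lemma pvSeps_length (tokens pos_list : List String)
    (h : tokens.length = pos_list.length) : (pvSeps tokens pos_list).length = tokens.length := by
  cases tokens with
  | nil => simp [pvSeps]
  | cons a ts => simp [pvSeps, ← h]

lemma pvSeps_getElem (tokens pos_list : List String) (h : tokens.length = pos_list.length)
    (i : Nat) (hi : i < (pvSeps tokens pos_list).length) :
    (pvSeps tokens pos_list)[i] =
    (if h1 : i + 1 < tokens.length then
      !((pos_list[i+1]'(by omega)) == "$." || (pos_list[i+1]'(by omega)) == "$," ||
        (tokens[i]'(by omega)) == "``" || (tokens[i]'(by omega)) == "(" || (tokens[i]'(by omega)) == "/" ||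
        (tokens[i+1]'h1) == "''" || (tokens[i+1]'h1) == ")" || (tokens[i+1]'h1) == "/")
     else false) := by
  have hlen := pvSeps_length tokens pos_list h
  have hn : i < tokens.length := by omega
  have hne : tokens.isEmpty = false := by
    cases tokens
    · simp at hn
    · simp
  have hmapl : ((tokens.zip ((tokens.drop 1).zip (pos_list.drop 1))).map
      (fun tp => !(tp.2.2 == "$." || tp.2.2 == "$," || tp.1 == "``" || tp.1 == "(" || tp.1 == "/" ||
                   tp.2.1 == "''" || tp.2.1 == ")" || tp.2.1 == "/"))).length = tokens.length - 1 := by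
    simp [← h]
  by_cases h1 : i + 1 < tokens.length
  · unfold pvSeps
    rw [List.getElem_append_left (by omega)]
    simp only [List.getElem_map, List.getElem_zip, List.getElem_drop, dif_pos h1]
    simp only [Nat.add_comm 1 i]
  · unfold pvSeps
    rw [List.getElem_append_right (by omega)]
    simp [hne, dif_neg h1]

lemma pvFoldlPointwise {α β σ : Type} (f : σ → α → σ) (g : σ → β → σ) :
    ∀ (l₁ : List α) (l₂ : List β), l₁.length = l₂.length →
    (∀ (i : Nat) (h₁ : i < l₁.length) (h₂ : i < l₂.length) (s : σ), f s l₁[i] = g s l₂[i]) →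
    ∀ s, l₁.foldl f s = l₂.foldl g s := by
  intro l₁
  induction l₁ with
  | nil => intro l₂ h _ s; cases l₂ <;> simp_all
  | cons a l ih =>
      intro l₂ h hp s
      cases l₂ with
      | nil => simp at h
      | cons b l₂ =>
          simp only [List.foldl_cons]
          have h0 := hp 0 (by simp) (by simp) s
          simp only [List.getElem_cons_zero] at h0
          rw [h0]
          exact ih l₂ (by simpa using h)
            (fun i hi hj s' => by simpa using hp (i + 1) (by simpa using hi) (by simpa using hj) s') _

lemma pvStep_spans : ∀ (pairs : List (String × Bool)) (tl : List (Int × Int)) (out : String),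
    (pairs.foldl pvStep (tl, out)).1 =
    (pairs.foldl
      (fun (st : List (Int × Int) × Int) (p : String × Bool) =>
        (st.1 ++ [(st.2, st.2 + PySem.Str.len p.1)],
         st.2 + PySem.Str.len p.1 + (if p.2 then 1 else 0))) (tl, PySem.Str.len out)).1 := by
  intro pairs
  induction pairs with
  | nil => intro tl out; rfl
  | cons p ps ih =>
      intro tl out
      simp only [List.foldl_cons, pvStep]
      rw [ih]
      have : PySem.Str.len (out ++ (p.1 ++ (if p.2 then " " else ""))) =
          PySem.Str.len out + PySem.Str.len p.1 + (if p.2 then 1 else 0) := by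
        rcases p with ⟨t, b⟩
        cases b <;> simp [PySem.Str.len_eq] <;> try ring
      rw [this]

lemma pvIntercalate_nil_cons (c : List Char) (cs : List (List Char)) :
    ([] : List Char).intercalate (c :: cs) = c ++ ([] : List Char).intercalate cs := by
  induction cs generalizing c <;> simp_all [List.intercalate, List.intersperse]

lemma pvJoin_empty_cons (c : String) (cs : List String) :
    PySem.Str.join "" (c :: cs) = c ++ PySem.Str.join "" cs := by
  apply String.ext
  simp [PySem.Str.toList_join, PySem.Chars.join, pvIntercalate_nil_cons]

lemma pvStep_text : ∀ (pairs : List (String × Bool)) (tl : List (Int × Int)) (out : String),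
    (pairs.foldl pvStep (tl, out)).2 =
    out ++ PySem.Str.join "" (pairs.map (fun p => p.1 ++ (if p.2 then " " else ""))) := by
  intro pairs
  induction pairs with
  | nil =>
      intro tl out
      apply String.ext
      simp [PySem.Str.toList_join, PySem.Chars.join, List.intercalate]
  | cons p ps ih =>
      intro tl out
      simp only [List.foldl_cons, pvStep, List.map_cons]
      rw [ih, pvJoin_empty_cons, String.append_assoc]

lemma pvA_eq_fold (tokens pos_list : List String) (h : tokens.length = pos_list.length) :
    sentence_from_tokens tokens pos_list =
    (let r := (tokens.zip (pvSeps tokens pos_list)).foldl pvStep ([], "")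
     (r.2, r.1)) := by
  unfold sentence_from_tokens
  have hsl := pvSeps_length tokens pos_list h
  have hz : (tokens.zip pos_list).length = tokens.length := by simp [h]
  have hlen1 : (PySem.List.enumerate (tokens.zip pos_list)).length = tokens.length := by
    simp [PySem.List.length_enumerate, hz]
  have hlen2 : (tokens.zip (pvSeps tokens pos_list)).length = tokens.length := by
    simp [hsl]
  have key : (PySem.List.enumerate (tokens.zip pos_list)).foldl
      (fun (st : List (Int × Int) × String) (ip : Int × (String × String)) =>
        let i := ip.1
        let token := ip.2.1
        let next_token : Option String :=
          if i < PySem.List.len tokens - 1 then PySem.List.pyGet? tokens (i + 1) else none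
        let next_pos : Option String :=
          if i < PySem.List.len tokens - 1 then PySem.List.pyGet? pos_list (i + 1) else none
        let token_list := st.1 ++ [(PySem.Str.len st.2, PySem.Str.len st.2 + PySem.Str.len token)]
        if next_pos == some "$." || next_pos == some "$," ||
           token == "``" || token == "(" || token == "/" ||
           next_token == some "''" || next_token == some ")" || next_token == some "/" ||
           next_token == none then
          (token_list, st.2 ++ token)
        else
          (token_list, st.2 ++ (token ++ " "))) ([], "") =
      (tokens.zip (pvSeps tokens pos_list)).foldl pvStep ([], "") := by
    apply pvFoldlPointwise _ _ _ _ (by omega)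
    intro i h₁ h₂ s
    have hi : i < tokens.length := by omega
    have hip : i < pos_list.length := by omega
    rw [PySem.List.getElem_enumerate, List.getElem_zip, List.getElem_zip,
        pvSeps_getElem tokens pos_list h i (by omega)]
    simp only [zero_add]
    by_cases h1 : i + 1 < tokens.length
    · have hguard : (i : Int) < PySem.List.len tokens - 1 := by
        rw [PySem.List.len_eq]; omega
      have hcast : ((i : Nat) : Int) + 1 = (((i + 1 : Nat)) : Int) := by push_cast; ring
      simp only [if_pos hguard, hcast, PySem.List.pyGet?_natCast,
        List.getElem?_eq_getElem h1,
        List.getElem?_eq_getElem (show i + 1 < pos_list.length by omega),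
        dif_pos h1, pvStep]
      by_cases hC : ((pos_list[i+1]'(by omega)) == "$." || (pos_list[i+1]'(by omega)) == "$," ||
          (tokens[i]'hi) == "``" || (tokens[i]'hi) == "(" || (tokens[i]'hi) == "/" ||
          (tokens[i+1]'h1) == "''" || (tokens[i+1]'h1) == ")" || (tokens[i+1]'h1) == "/") = true
      · simp [hC]
      · simp only [Bool.not_eq_true] at hC
        simp [hC]
    · have hguard : ¬ ((i : Int) < PySem.List.len tokens - 1) := by
        rw [PySem.List.len_eq]; omega
      simp only [if_neg hguard, dif_neg h1, pvStep]
      simp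
  rw [key]

-- ===== VERDICT (by name: the statement is the Claim_ definition above) =====
theorem sentence_from_tokens_spec : Claim_equal_sentence_from_tokens := by
  intro tokens pos_list _ hpre
  unfold Spec_sentence_from_tokens
  rw [pvA_eq_fold tokens pos_list hpre]
  unfold sentence_from_tokens_alt
  rw [show (((tokens.zip ((tokens.drop 1).zip (pos_list.drop 1))).map
      (fun tp => !(tp.2.2 == "$." || tp.2.2 == "$," || tp.1 == "``" || tp.1 == "(" || tp.1 == "/" ||
                   tp.2.1 == "''" || tp.2.1 == ")" || tp.2.1 == "/")))
    ++ (if tokens.isEmpty then [] else [false])) = pvSeps tokens pos_list from rfl]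
  have hs := pvStep_spans (tokens.zip (pvSeps tokens pos_list)) [] ""
  have ht := pvStep_text (tokens.zip (pvSeps tokens pos_list)) [] ""
  have hlen0 : PySem.Str.len "" = 0 := by decide
  rw [hlen0] at hs
  refine Prod.ext ?_ ?_
  · simpa using ht
  · simpa using hs
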